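-- pv_equiv track=rewrite | github.com/stenwire/alx-higher_level_programming | 0x05-python-exceptions/0-safe_print_list.py | safe_print_list
-- ===== SOURCE A (Python) =====
-- def safe_print_list(my_list=[], x=0):
--     len = 0
--     num_of_elm_to_print = 0
--     new_list = ''
--
--     try:
--         for item in my_list:
--             len += 1
--
--         if x > len:
--             num_of_elm_to_print = len
--         else:
--             num_of_elm_to_print = x
--
--         for i in range(0, num_of_elm_to_print):
--             new_list += str(my_list[i])
--         print (int(new_list))
--         return (num_of_elm_to_print)
--
--     except (NameError, ValueError, SyntaxError):
--         print ('An error occured, pls try again!')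
-- ===== SOURCE B (Python) =====
-- def safe_print_list(my_list=[], x=0):
--     count = 0
--     new_list = ''
--     try:
--         for item in my_list:
--             if count >= x:
--                 break
--             new_list += str(item)
--             count += 1
--         print(int(new_list))
--         return count
--     except (NameError, ValueError, SyntaxError):
--         print('An error occured, pls try again!')
-- ===== Notes on version B (the rewrite author's own statement) =====
-- stated objective: simpler
-- what changed: Single pass with an early break replaces A's separate length-counting loop, min computation, and index-based range loop; the digit string is accumulated in the same pass so the int('')/negative-element error behaviour is identical.
import Mathlib
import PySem

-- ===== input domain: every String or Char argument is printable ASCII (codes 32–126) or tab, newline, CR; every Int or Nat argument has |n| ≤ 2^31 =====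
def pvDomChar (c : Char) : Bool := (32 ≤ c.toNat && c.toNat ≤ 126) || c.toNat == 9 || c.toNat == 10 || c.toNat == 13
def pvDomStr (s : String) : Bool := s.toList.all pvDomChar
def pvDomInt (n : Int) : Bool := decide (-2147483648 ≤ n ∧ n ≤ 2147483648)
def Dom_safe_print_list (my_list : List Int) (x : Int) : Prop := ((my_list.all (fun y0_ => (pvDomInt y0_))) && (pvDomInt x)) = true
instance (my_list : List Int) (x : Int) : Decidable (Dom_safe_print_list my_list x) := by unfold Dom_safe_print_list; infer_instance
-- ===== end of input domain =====

-- B replaces A's three-phase count/min/index-loop with one early-exit pass; return-value equivalence only (both print).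

-- ===== PORT A =====
-- A: count the length, take n = min-by-branch, then concatenate str(my_list[i]) over range(0, n);
-- int(new_list) raising ValueError (empty string, '-' in the middle) makes A return None.
def safe_print_list (my_list : List Int) (x : Int) : Option Int :=
  let len : Int := my_list.foldl (fun acc _ => acc + 1) 0
  let n : Int := if x > len then len else x
  -- pyGetD is exact here: every i in range(0, n) satisfies 0 ≤ i < my_list.length, so xs[i] never raises
  let new_list : List Char :=
    (PySem.List.pyRange 0 n 1).foldl
      (fun s i => s ++ PySem.Int.toChars (PySem.List.pyGetD my_list i 0)) []
  match PySem.Int.ofChars? new_list with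
  | some _ => some n
  | none => none

-- ===== PORT B =====
-- B's loop: walk the list once, breaking as soon as count >= x, accumulating the string and the count together.
def goB (l : List Int) (x : Int) (count : Int) (s : List Char) : Int × List Char :=
  match l with
  | [] => (count, s)
  | h :: t => if count ≥ x then (count, s) else goB t x (count + 1) (s ++ PySem.Int.toChars h)

def safe_print_list_alt (my_list : List Int) (x : Int) : Option Int :=
  let r := goB my_list x 0 []
  match PySem.Int.ofChars? r.2 with
  | some _ => some r.1
  | none => none

-- ===== PRECONDITION & SPEC =====
def Spec_safe_print_list (my_list : List Int) (x : Int) (out : Option Int) : Prop := out = safe_print_list_alt my_list x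
instance (my_list : List Int) (x : Int) (out : Option Int) : Decidable (Spec_safe_print_list my_list x out) := by unfold Spec_safe_print_list; infer_instance

-- ===== CLAIM (what is proved, stated in full; the proofs are below) =====
def Claim_equal_safe_print_list : Prop := ∀ (my_list : List Int) (x : Int), Dom_safe_print_list my_list x → Spec_safe_print_list my_list x (safe_print_list my_list x)

-- ===== LEMMAS AND PROOFS =====

theorem lenA_eq (l : List Int) (c : Int) : l.foldl (fun acc _ => acc + 1) c = c + l.length := by
  induction l generalizing c with
  | nil => simp
  | cons h t ih => simp [List.foldl, ih]; omega

-- B's loop computes the branch-free form: count = min-shaped result, string = concat of the first (x - c) reprs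
theorem goB_spec (l : List Int) (x : Int) : ∀ (c : Int) (s : List Char),
    goB l x c s = (if x > c + l.length then c + l.length else max c x,
                   s ++ ((l.take (x - c).toNat).map PySem.Int.toChars).flatten) := by
  induction l with
  | nil =>
    intro c s
    simp only [goB, List.length_nil, List.take_nil, List.map_nil, List.flatten_nil, List.append_nil]
    congr 1
    omega
  | cons h t ih =>
    intro c s
    by_cases hc : c ≥ x
    · have h1 : (x - c).toNat = 0 := by omega
      simp only [goB, if_pos hc, h1, List.take_zero, List.map_nil, List.flatten_nil,
        List.append_nil, List.length_cons]
      congr 1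
      omega
    · have hcx : c < x := by omega
      have h1 : (x - c).toNat = ((x - (c + 1)).toNat) + 1 := by omega
      simp only [goB, if_neg hc, ih (c + 1) (s ++ PySem.Int.toChars h), h1, List.take_succ_cons,
        List.map_cons, List.flatten_cons, List.length_cons]
      rw [Prod.mk.injEq]
      constructor
      · split_ifs with h2 h3 h3 <;> push_cast <;> omega
      · simp [List.append_assoc]

-- A's index loop builds the concatenation of the reprs of the first n elements
theorem foldA_eq (l : List Int) (n : Nat) (hn : n ≤ l.length) :
    (PySem.List.pyRange 0 (n : Int) 1).foldl
      (fun s i => s ++ PySem.Int.toChars (PySem.List.pyGetD l i 0)) []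
    = ((l.take n).map PySem.Int.toChars).flatten := by
  induction n with
  | zero => simp
  | succ m ih =>
    have hm : m ≤ l.length := by omega
    have hlt : m < l.length := by omega
    have hsplit : PySem.List.pyRange 0 ((m : Int) + 1) 1
        = PySem.List.pyRange 0 (m : Int) 1 ++ [(m : Int)] :=
      PySem.List.pyRange_one_succ_right (by positivity)
    have hcast : ((m + 1 : Nat) : Int) = (m : Int) + 1 := by push_cast; ring
    rw [hcast, hsplit, List.foldl_append, ih hm]
    simp only [List.foldl_cons, List.foldl_nil, PySem.List.pyGetD_natCast]
    rw [List.getD_eq_getElem l 0 hlt]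
    rw [List.take_succ, List.getElem?_eq_getElem hlt]
    simp only [List.map_append, List.map_cons, List.map_nil, Option.toList_some,
      List.flatten_append, List.flatten_cons, List.flatten_nil, List.append_nil]

theorem ofChars?_match_eq (s : List Char) (a b : Int) (h : a = b) :
    (match PySem.Int.ofChars? s with | some _ => some a | none => none)
    = (match PySem.Int.ofChars? s with | some _ => some b | none => none) := by
  rw [h]

theorem ab_eq (my_list : List Int) (x : Int) :
    safe_print_list my_list x = safe_print_list_alt my_list x := by
  unfold safe_print_list safe_print_list_alt
  rw [lenA_eq, goB_spec]
  simp only [Int.zero_add]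
  by_cases hx : x > (my_list.length : Int)
  · -- n = len; B takes the whole list
    have h1 : (x - 0).toNat ≥ my_list.length := by omega
    have h2 : ((my_list.length : Nat) : Int) = (my_list.length : Int) := rfl
    rw [if_pos hx, if_pos hx, List.take_of_length_le h1]
    rw [show ((my_list.length : Nat) : Int) = ((my_list.length : Nat) : Int) from rfl]
    rw [foldA_eq my_list my_list.length (le_refl _)]
    simp [List.take_of_length_le]
  · -- n = x
    rw [if_neg hx, if_neg hx]
    by_cases hx0 : 0 ≤ x
    · have hxt : x.toNat ≤ my_list.length := by omega
      have hxc : ((x.toNat : Nat) : Int) = x := by omega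
      rw [← hxc, foldA_eq my_list x.toNat hxt]
      have h3 : (((x.toNat : Nat) : Int) - 0).toNat = x.toNat := by omega
      rw [h3]
      simp only [List.nil_append]
      exact ofChars?_match_eq _ _ _ (by omega)
    · -- x < 0 : A's range is empty, B breaks immediately; both parse '' and return none
      have h1 : PySem.List.pyRange 0 x 1 = [] := PySem.List.pyRange_one_eq_nil (by omega)
      have h2 : (x - 0).toNat = 0 := by omega
      rw [h1, h2]
      have he : PySem.Int.ofChars? ([] : List Char) = none := by decide
      simp only [List.take_zero, List.map_nil, List.flatten_nil, List.append_nil,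
        List.foldl_nil, he]

-- ===== VERDICT (by name: the statement is the Claim_ definition above) =====
theorem safe_print_list_spec : Claim_equal_safe_print_list := by
  intro my_list x _
  unfold Spec_safe_print_list
  exact ab_eq my_list x
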